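-- pv_equiv track=rewrite | github.com/Fondamenti18/fondamenti-di-programmazione | students/1806064/homework03/program02.py | sinistra
-- ===== SOURCE A (Python) =====
-- def colora_quad(output,y,x,c):
--     for j in range(y,y+40):
--         for i in range(x,x+40):
--             output[j][i]=c
--     return output
--
-- def sinistra(y,x,matrice,larghezza):
--     contapassi=""
--     x-=40
--     while x>=0:
--         valore=matrice[y][x]
--         if valore!=(255,0,0) and valore!=(0,255,0):
--             matrice=colora_quad(matrice,y,x,(0,255,0))
--             contapassi+="2"
--             x-=40
--         else:
--             return y,x+40,matrice,contapassi
--     x+=40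
--     return y,x,matrice,contapassi
-- ===== SOURCE B (Python) =====
-- def colora_quad(output, y, x, c):
--     for j in range(y, y + 40):
--         for i in range(x, x + 40):
--             output[j][i] = c
--     return output
--
-- def sinistra(y, x, matrice, larghezza):
--     # Pass 1: read-only scan — count consecutive uncolored blocks to the left.
--     count = 0
--     pos = x - 40
--     while pos >= 0 and matrice[y][pos] not in ((255, 0, 0), (0, 255, 0)):
--         count += 1
--         pos -= 40
--     # Pass 2: paint exactly those blocks green.
--     for k in range(1, count + 1):
--         colora_quad(matrice, y, x - 40 * k, (0, 255, 0))
--     return y, pos + 40, matrice, "2" * count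
-- ===== Notes on version B (the rewrite author's own statement) =====
-- stated objective: alternative
-- what changed: A interleaves scanning and painting in one mutating while-loop; B first does a read-only scan counting the consecutive uncolorable-free blocks and recording the stop position, then paints exactly that many blocks in a separate pass and builds the step string by replication.
import Mathlib
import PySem

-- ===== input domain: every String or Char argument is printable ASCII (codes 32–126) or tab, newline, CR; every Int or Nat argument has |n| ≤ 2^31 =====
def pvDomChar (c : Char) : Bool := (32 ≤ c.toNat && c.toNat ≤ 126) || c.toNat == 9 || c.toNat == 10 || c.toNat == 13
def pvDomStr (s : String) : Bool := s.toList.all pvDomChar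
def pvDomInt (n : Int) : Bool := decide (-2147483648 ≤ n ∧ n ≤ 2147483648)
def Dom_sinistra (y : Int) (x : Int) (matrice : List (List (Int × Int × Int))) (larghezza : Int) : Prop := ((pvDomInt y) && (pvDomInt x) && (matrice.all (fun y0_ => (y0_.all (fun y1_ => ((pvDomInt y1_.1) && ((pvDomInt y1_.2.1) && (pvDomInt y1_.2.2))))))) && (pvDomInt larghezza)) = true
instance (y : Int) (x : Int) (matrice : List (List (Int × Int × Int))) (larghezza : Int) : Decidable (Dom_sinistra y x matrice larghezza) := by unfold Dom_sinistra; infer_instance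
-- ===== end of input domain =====

-- B separates A's single mutating scan-and-paint while-loop into a read-only counting scan followed by
-- a separate paint pass ('alternative' decomposition, same cost); like A, the Python B mutates `matrice`
-- in place (the same cells are painted), and the equivalence proved here is about the return value.


-- ===== PORT A =====
-- output[j][i] = c  (in-place assignment, ported as read-row / set-cell / write-row-back)
def colora_quad (output : List (List (Int × Int × Int))) (y : Int) (x : Int) (c : Int × Int × Int) :
    List (List (Int × Int × Int)) :=
  (PySem.List.pyRange y (y + 40) 1).foldl
    (fun out j =>
      (PySem.List.pyRange x (x + 40) 1).foldl
        (fun o i => PySem.List.pySetD o j (PySem.List.pySetD (PySem.List.pyGetD o j []) i c)) out)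
    output

-- A's while-loop; the default (0, 0, 0) of pyGetD is never read under Pre_sinistra
def sinLoop (y : Int) (matrice : List (List (Int × Int × Int))) (x : Int) (contapassi : String) :
    Int × Int × (List (List (Int × Int × Int))) × String :=
  if 0 ≤ x then
    -- valore = matrice[y][x], inlined
    if PySem.List.pyGetD (PySem.List.pyGetD matrice y []) x (0, 0, 0) ≠ (255, 0, 0) ∧
       PySem.List.pyGetD (PySem.List.pyGetD matrice y []) x (0, 0, 0) ≠ (0, 255, 0) then
      sinLoop y (colora_quad matrice y x (0, 255, 0)) (x - 40) (contapassi ++ "2")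
    else (y, x + 40, matrice, contapassi)
  else (y, x + 40, matrice, contapassi)
  termination_by (x + 40).toNat
  decreasing_by omega

def sinistra (y : Int) (x : Int) (matrice : List (List (Int × Int × Int))) (larghezza : Int) :
    Int × Int × (List (List (Int × Int × Int))) × String :=
  sinLoop y matrice (x - 40) ""

-- ===== PORT B =====
-- pass 1: read-only scan, returns (stop position, number of paintable blocks)
def scanLeft (y : Int) (matrice : List (List (Int × Int × Int))) (pos : Int) (count : Nat) :
    Int × Nat :=
  if 0 ≤ pos then
    -- v = matrice[y][pos], inlined
    if PySem.List.pyGetD (PySem.List.pyGetD matrice y []) pos (0, 0, 0) = (255, 0, 0) ∨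
       PySem.List.pyGetD (PySem.List.pyGetD matrice y []) pos (0, 0, 0) = (0, 255, 0) then (pos, count)
    else scanLeft y matrice (pos - 40) (count + 1)
  else (pos, count)
  termination_by (pos + 40).toNat
  decreasing_by omega

def sinistra_alt (y : Int) (x : Int) (matrice : List (List (Int × Int × Int))) (larghezza : Int) :
    Int × Int × (List (List (Int × Int × Int))) × String :=
  let pc := scanLeft y matrice (x - 40) 0
  -- pass 2: paint exactly pc.2 blocks green (for k in range(1, count+1)), "2" * count
  let m := (PySem.List.pyRange 1 ((pc.2 : Int) + 1)).foldl
    (fun mm k => colora_quad mm y (x - 40 * k) (0, 255, 0)) matrice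
  (y, pc.1 + 40, m, String.ofList (List.replicate pc.2 '2'))

-- ===== PRECONDITION & SPEC =====
-- Pre_ requires that, whenever the loop runs at all (x ≥ 40), the scanned/painted strip (rows y..y+39,
-- columns 0..x-1) lies fully inside the grid: outside that A usually raises IndexError mid-read or
-- mid-paint, and on the remaining corner inputs (negative-index wraparound, or an obstacle met before
-- the missing cells are reached) A returns a value that B also returns — see the cited excluded examples.
def Pre_sinistra (y : Int) (x : Int) (matrice : List (List (Int × Int × Int))) (larghezza : Int) : Prop :=
  x < 40 ∨ (0 ≤ y ∧ y + 40 ≤ (matrice.length : Int) ∧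
    ∀ row ∈ (matrice.drop y.toNat).take 40, x ≤ (row.length : Int))
instance (y : Int) (x : Int) (matrice : List (List (Int × Int × Int))) (larghezza : Int) : Decidable (Pre_sinistra y x matrice larghezza) := by unfold Pre_sinistra; infer_instance

def pvWitness_sinistra : Int × Int × (List (List (Int × Int × Int))) × Int := (0, 0, [[(7, 7, 7)]], 1)

def Spec_sinistra (y : Int) (x : Int) (matrice : List (List (Int × Int × Int))) (larghezza : Int) (out : Int × Int × (List (List (Int × Int × Int))) × String) : Prop := out = sinistra_alt y x matrice larghezza
instance (y : Int) (x : Int) (matrice : List (List (Int × Int × Int))) (larghezza : Int) (out : Int × Int × (List (List (Int × Int × Int))) × String) : Decidable (Spec_sinistra y x matrice larghezza out) := by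
  unfold Spec_sinistra
  have h3 : DecidableEq ((List (List (Int × Int × Int))) × String) := instDecidableEqProd
  have h2 : DecidableEq (Int × (List (List (Int × Int × Int))) × String) := @instDecidableEqProd _ _ _ h3
  have h1 : DecidableEq (Int × Int × (List (List (Int × Int × Int))) × String) := @instDecidableEqProd _ _ _ h2
  exact h1 _ _

-- ===== CLAIM (what is proved, stated in full; the proofs are below) =====
def Claim_equal_sinistra : Prop := ∀ (y : Int) (x : Int) (matrice : List (List (Int × Int × Int))) (larghezza : Int), Dom_sinistra y x matrice larghezza → Pre_sinistra y x matrice larghezza → Spec_sinistra y x matrice larghezza (sinistra y x matrice larghezza)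

-- ===== LEMMAS AND PROOFS =====

-- reading matrice[yy][ii]
def readCell (m : List (List (Int × Int × Int))) (yy ii : Int) : Int × Int × Int :=
  PySem.List.pyGetD (PySem.List.pyGetD m yy []) ii (0, 0, 0)

theorem pyGetD_nonneg {α : Type} (xs : List α) (i : Int) (d : α) (h : 0 ≤ i) :
    PySem.List.pyGetD xs i d = xs.getD i.toNat d := by
  have h2 : ((i.toNat : Nat) : Int) = i := Int.toNat_of_nonneg h
  rw [← h2, PySem.List.pyGetD_natCast, h2]

-- a single cell write at column i does not change reads at (nonnegative) column ii < i
theorem readCell_set_step (o : List (List (Int × Int × Int))) (j i : Int) (c : Int × Int × Int)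
    (yy ii : Int) (hj : 0 ≤ j) (hyy : 0 ≤ yy) (hii : 0 ≤ ii) (hlt : ii < i) :
    readCell (PySem.List.pySetD o j (PySem.List.pySetD (PySem.List.pyGetD o j []) i c)) yy ii
      = readCell o yy ii := by
  have hi : (0:Int) ≤ i := le_of_lt (lt_of_le_of_lt hii hlt)
  have hne : i.toNat ≠ ii.toNat := by omega
  unfold readCell
  rw [PySem.List.pySetD_of_nonneg _ _ hi, PySem.List.pySetD_of_nonneg _ _ hj,
      pyGetD_nonneg _ j _ hj, pyGetD_nonneg _ yy _ hyy, pyGetD_nonneg _ yy _ hyy,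
      pyGetD_nonneg _ ii _ hii, pyGetD_nonneg _ ii _ hii]
  by_cases hrow : yy.toNat = j.toNat
  · rw [hrow]
    by_cases hlen : j.toNat < o.length
    · simp only [List.getD_eq_getElem?_getD]
      rw [List.getElem?_set_self hlen, Option.getD_some, List.getElem?_set_ne hne]
    · rw [List.set_eq_of_length_le (by omega)]
  · simp only [List.getD_eq_getElem?_getD]
    rw [List.getElem?_set_ne (by omega)]

-- painting a block with left edge xp (row block start yp ≥ 0) does not change reads
-- at nonnegative columns ii < xp
theorem readCell_paint (m : List (List (Int × Int × Int))) (yp xp : Int) (c : Int × Int × Int)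
    (yy ii : Int) (hyp : 0 ≤ yp) (hyy : 0 ≤ yy) (hii : 0 ≤ ii) (hlt : ii < xp) :
    readCell (colora_quad m yp xp c) yy ii = readCell m yy ii := by
  unfold colora_quad
  have hinner : ∀ (j : Int), 0 ≤ j → ∀ (is : List Int), (∀ i' ∈ is, ii < i') →
      ∀ (m : List (List (Int × Int × Int))),
      readCell (is.foldl
        (fun o i => PySem.List.pySetD o j (PySem.List.pySetD (PySem.List.pyGetD o j []) i c)) m) yy ii
      = readCell m yy ii := by
    intro j hj is
    induction is with
    | nil => intro _ m; rfl
    | cons i' is ih =>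
      intro his m
      simp only [List.foldl_cons]
      rw [ih (fun a ha => his a (List.mem_cons_of_mem _ ha)),
          readCell_set_step m j i' c yy ii hj hyy hii (his i' List.mem_cons_self)]
  have houter : ∀ (js : List Int), (∀ j ∈ js, 0 ≤ j) → ∀ (m : List (List (Int × Int × Int))),
      readCell (js.foldl (fun out j =>
        (PySem.List.pyRange xp (xp + 40) 1).foldl
          (fun o i => PySem.List.pySetD o j (PySem.List.pySetD (PySem.List.pyGetD o j []) i c)) out) m) yy ii
      = readCell m yy ii := by
    intro js
    induction js with
    | nil => intro _ m; rfl
    | cons j js ih =>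
      intro hjs m
      simp only [List.foldl_cons]
      rw [ih (fun a ha => hjs a (List.mem_cons_of_mem _ ha)),
          hinner j (hjs j List.mem_cons_self) _
            (fun i' hi' => lt_of_lt_of_le hlt (PySem.List.mem_pyRange_one.1 hi').1)]
  exact houter _ (fun j hj' => le_trans hyp (PySem.List.mem_pyRange_one.1 hj').1) m

-- the read-only scan is unaffected by having painted a block strictly to its right
theorem scanLeft_paint (y : Int) (xp : Int) (c : Int × Int × Int)
    (hy : 0 ≤ y) :
    ∀ (n : Nat) (p : Int), (p + 40).toNat ≤ n → p < xp →
      ∀ (m : List (List (Int × Int × Int))) (cnt : Nat),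
      scanLeft y (colora_quad m y xp c) p cnt = scanLeft y m p cnt := by
  intro n
  induction n with
  | zero =>
    intro p hp _ m cnt
    conv_lhs => rw [scanLeft.eq_def]
    conv_rhs => rw [scanLeft.eq_def]
    rw [if_neg (by omega), if_neg (by omega)]
  | succ n ih =>
    intro p hp hplt m cnt
    by_cases h0 : 0 ≤ p
    · conv_lhs => rw [scanLeft.eq_def]
      conv_rhs => rw [scanLeft.eq_def]
      rw [if_pos h0, if_pos h0]
      have hv := readCell_paint m y xp c y p hy hy h0 (lt_of_lt_of_le hplt (le_refl xp))
      unfold readCell at hv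
      simp only [hv]
      split
      · rfl
      · exact ih (p - 40) (by omega) (by omega) m (cnt + 1)
    · conv_lhs => rw [scanLeft.eq_def]
      conv_rhs => rw [scanLeft.eq_def]
      rw [if_neg h0, if_neg h0]

-- the count accumulator merely adds
theorem scanLeft_shift (y : Int) (m : List (List (Int × Int × Int))) :
    ∀ (n : Nat) (p : Int), (p + 40).toNat ≤ n → ∀ (cnt : Nat),
      scanLeft y m p cnt = ((scanLeft y m p 0).1, cnt + (scanLeft y m p 0).2) := by
  intro n
  induction n with
  | zero =>
    intro p hp cnt
    conv_lhs => rw [scanLeft.eq_def]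
    conv_rhs => rw [scanLeft.eq_def]
    rw [if_neg (by omega), if_neg (by omega)]
    simp
  | succ n ih =>
    intro p hp cnt
    by_cases h0 : 0 ≤ p
    · conv_lhs => rw [scanLeft.eq_def]
      conv_rhs => rw [scanLeft.eq_def]
      rw [if_pos h0, if_pos h0]
      split
      · rfl
      · rw [ih (p - 40) (by omega) (cnt + 1), ih (p - 40) (by omega) 1, Nat.add_assoc]
    · conv_lhs => rw [scanLeft.eq_def]
      conv_rhs => rw [scanLeft.eq_def]
      rw [if_neg h0, if_neg h0]
      simp

-- "2"-strings concatenate by counting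
theorem str_two_append (s : String) (n : Nat) :
    (s ++ "2") ++ String.ofList (List.replicate n '2') = s ++ String.ofList (List.replicate (n + 1) '2') := by
  rw [String.append_assoc, List.replicate_succ,
      show ('2' :: List.replicate n '2') = ['2'] ++ List.replicate n '2' from rfl,
      String.ofList_append]

-- main loop characterisation: A's loop = read-only scan, then paint, then replicate
theorem sinLoop_eq (y : Int) (hy : 0 ≤ y) :
    ∀ (n : Nat) (x : Int), (x + 40).toNat ≤ n → ∀ (m : List (List (Int × Int × Int))) (s : String),
      sinLoop y m x s =
        (y, (scanLeft y m x 0).1 + 40,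
         (List.range (scanLeft y m x 0).2).foldl
           (fun mm (k : Nat) => colora_quad mm y (x - 40 * (k : Int)) (0, 255, 0)) m,
         s ++ String.ofList (List.replicate (scanLeft y m x 0).2 '2')) := by
  intro n
  induction n with
  | zero =>
    intro x hx m s
    conv_lhs => rw [sinLoop.eq_def]
    conv_rhs => rw [scanLeft.eq_def]
    rw [if_neg (by omega), if_neg (by omega)]
    simp
  | succ n ih =>
    intro x hx m s
    by_cases h0 : 0 ≤ x
    · conv_lhs => rw [sinLoop.eq_def]
      conv_rhs => rw [scanLeft.eq_def]
      rw [if_pos h0, if_pos h0]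
      by_cases hcol : PySem.List.pyGetD (PySem.List.pyGetD m y []) x (0, 0, 0) = (255, 0, 0) ∨
          PySem.List.pyGetD (PySem.List.pyGetD m y []) x (0, 0, 0) = (0, 255, 0)
      · rw [if_neg (by tauto), if_pos hcol]
        simp
      · rw [if_pos ⟨fun h => hcol (Or.inl h), fun h => hcol (Or.inr h)⟩, if_neg hcol]
        rw [ih (x - 40) (by omega) (colora_quad m y x (0, 255, 0)) (s ++ "2")]
        rw [scanLeft_paint y x (0, 255, 0) hy (x.toNat) (x - 40) (by omega) (by omega) m 0]
        rw [show (0 + 1 : Nat) = 1 from rfl,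
            scanLeft_shift y m (x.toNat) (x - 40) (by omega) 1]
        simp only [Prod.mk.injEq]
        refine ⟨trivial, trivial, ?_, ?_⟩
        · -- matrices
          rw [show (1 + (scanLeft y m (x - 40) 0).2) = (scanLeft y m (x - 40) 0).2 + 1 from by omega,
              List.range_succ_eq_map, List.foldl_cons, List.foldl_map]
          have h1 : colora_quad m y (x - 40 * ((0 : Nat) : Int)) (0, 255, 0)
              = colora_quad m y x (0, 255, 0) := by norm_num
          rw [h1]
          have h2 : (fun (mm : List (List (Int × Int × Int))) (k : Nat) =>
                colora_quad mm y (x - 40 - 40 * (k : Int)) (0, 255, 0))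
              = (fun (mm : List (List (Int × Int × Int))) (k : Nat) =>
                colora_quad mm y (x - 40 * ((k.succ : Nat) : Int)) (0, 255, 0)) := by
            funext mm k
            congr 1
            push_cast
            ring
          rw [← h2]
        · -- strings
          rw [show (1 + (scanLeft y m (x - 40) 0).2) = (scanLeft y m (x - 40) 0).2 + 1 from by omega,
              str_two_append]
    · conv_lhs => rw [sinLoop.eq_def]
      conv_rhs => rw [scanLeft.eq_def]
      rw [if_neg h0, if_neg h0]
      simp

theorem sinistra_spec : Claim_equal_sinistra := by
  intro y x m l _ hpre
  unfold Spec_sinistra sinistra sinistra_alt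
  by_cases hx : x < 40
  · conv_lhs => rw [sinLoop.eq_def]
    rw [if_neg (by omega)]
    conv_rhs => rw [scanLeft.eq_def]
    rw [if_neg (by omega)]
    simp
  · have hy : 0 ≤ y := by
      rcases hpre with h | h
      · omega
      · exact h.1
    rw [sinLoop_eq y hy ((x - 40) + 40).toNat (x - 40) (by omega) m ""]
    simp only [Prod.mk.injEq]
    refine ⟨trivial, trivial, ?_, ?_⟩
    · rw [PySem.List.pyRange_one,
          show (((scanLeft y m (x - 40) 0).2 : Int) + 1 - 1).toNat = (scanLeft y m (x - 40) 0).2 from by omega,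
          List.foldl_map]
      have h2 : (fun (mm : List (List (Int × Int × Int))) (k : Nat) =>
          colora_quad mm y (x - 40 - 40 * (k : Int)) (0, 255, 0))
          = (fun (mm : List (List (Int × Int × Int))) (k : Nat) =>
          colora_quad mm y (x - 40 * (1 + (k : Int))) (0, 255, 0)) := by
        funext mm k
        congr 1
        ring
      rw [← h2]
    · simp
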